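-- pv_equiv track=rewrite | github.com/Ayush-Tiwari1/DSA | Days.43/5.Palindromic-Permutations.py | PalindromicPermutations
-- ===== SOURCE A (Python) =====
-- def Palindrome(temp,string,ans,set):
--     if temp=="":
--         if string not in set:
--             ans.append(string)
--         set.add(string)
--         return
--     for i in range(len(temp)):
--         substr1=temp[0:i]
--         substr2=temp[i+1:]
--         Palindrome(substr1+substr2,string+temp[i],ans,set)
--
-- def PalindromicPermutations(string):
--     dict={}
--     for char in string:
--         if char in dict:
--             dict[char]+=1
--         else:
--             dict[char]=1
--     oddcount=0
--     oddchar=''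
--     temp=""
--     for key,value in dict.items():
--         if value%2!=0:
--             oddcount+=1
--             oddchar=key
--         temp+=((value//2)*key)
--     if oddcount>1:
--         return []
--     st=set()
--     ans=[]
--     Palindrome(temp,"",ans,st)
--     finalans=[]
--     for string in ans:
--         finalans.append(string+oddchar+string[::-1])
--     finalans.sort()
--     return finalans
-- ===== SOURCE B (Python) =====
-- def PalindromicPermutations(string):
--     counts = {}
--     for ch in string:
--         counts[ch] = counts.get(ch, 0) + 1
--     odd = [ch for ch, v in counts.items() if v % 2 != 0]
--     if len(odd) > 1:
--         return []
--     mid = odd[0] if odd else ''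
--     items = [(ch, v // 2) for ch, v in counts.items() if v // 2 > 0]
--     total = sum(c for _, c in items)
--     halves = []
--
--     def backtrack(items, prefix):
--         if len(prefix) == total:
--             halves.append(prefix)
--             return
--         for idx, (ch, c) in enumerate(items):
--             if c > 0:
--                 backtrack(items[:idx] + [(ch, c - 1)] + items[idx + 1:], prefix + ch)
--
--     backtrack(items, "")
--     res = [h + mid + h[::-1] for h in halves]
--     res.sort()
--     return res
-- ===== Notes on version B (the rewrite author's own statement) =====
-- stated objective: faster
-- what changed: A enumerates every permutation of the half-string recursively (k! branches) and deduplicates through a set; B backtracks over the character-count multiset so each distinct half-permutation is generated exactly once, then sorts.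
import Mathlib
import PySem

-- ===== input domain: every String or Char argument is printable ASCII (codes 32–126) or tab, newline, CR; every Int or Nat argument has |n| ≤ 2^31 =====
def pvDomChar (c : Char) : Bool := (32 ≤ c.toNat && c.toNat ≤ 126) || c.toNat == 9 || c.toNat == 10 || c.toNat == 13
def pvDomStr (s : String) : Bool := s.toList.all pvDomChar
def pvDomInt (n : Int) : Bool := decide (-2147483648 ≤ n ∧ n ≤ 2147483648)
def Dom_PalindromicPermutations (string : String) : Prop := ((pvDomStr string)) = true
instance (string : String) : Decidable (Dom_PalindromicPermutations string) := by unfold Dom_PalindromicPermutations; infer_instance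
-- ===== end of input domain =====

-- B replaces A's factorial enumeration of all half-string permutations (deduplicated through a set)
-- by backtracking over the character-count multiset, emitting each distinct half exactly once; objective: faster.

-- ===== PORT A =====
-- termination measures of the two recursions (cited by name from decreasing_by)
theorem pvPalinA_dec (temp : List Char) (i : Nat) (hi : i < temp.length) :
    (temp.take i ++ temp.drop (i + 1)).length < temp.length := by
  simp only [List.length_append, List.length_take, List.length_drop]
  omega

theorem pvBtB_dec (items : List (Char × Int)) (i : Nat) (hi : i < items.length)
    (hp : 0 < (items[i]'hi).2) :
    ((items.take i ++ [((items[i]'hi).1, (items[i]'hi).2 - 1)] ++ items.drop (i + 1)).map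
        (fun p => p.2.toNat)).sum
      < (items.map (fun p => p.2.toNat)).sum := by
  have hsplit : items = items.take i ++ items[i] :: items.drop (i + 1) := by
    rw [List.getElem_cons_drop, List.take_append_drop]
  conv_rhs => rw [hsplit]
  simp only [List.map_append, List.map_cons, List.sum_append, List.sum_cons,
    List.map_take, List.map_drop, List.map_nil, List.sum_nil, add_zero]
  omega

-- Palindrome(temp, string, ans, set): strings are ported as List Char; the slice temp[0:i]+temp[i+1:]
-- is take i ++ drop (i+1), exact here because 0 ≤ i < len(temp); (ans, set) is the threaded state.
def pvPalinA (temp : List Char) (s : List Char)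
    (st : List (List Char) × PySem.Set (List Char)) :
    List (List Char) × PySem.Set (List Char) :=
  if temp = [] then
    ((if PySem.Set.contains st.2 s then st.1 else st.1 ++ [s]), PySem.Set.add st.2 s)
  else
    (List.range temp.length).attach.foldl
      (fun acc i =>
        pvPalinA (temp.take i.1 ++ temp.drop (i.1 + 1))
          (s ++ [temp[i.1]'(List.mem_range.mp i.2)]) acc)
      st
termination_by temp.length
decreasing_by
  exact pvPalinA_dec temp i.1 (List.mem_range.mp i.2)

-- (value//2)*key is List.replicate (value//2).toNat key, exact because value ≥ 0 here;
-- oddchar '' / key is [] / [key]; string[::-1] is List.reverse.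
def PalindromicPermutations (string : String) : List String :=
  let d := string.toList.foldl
    (fun d c => if d.contains c then d.modify c 0 (· + 1) else d.insert c 1)
    PySem.Dict.empty
  let acc := d.items.foldl
    (fun (acc : Int × List Char × List Char) kv =>
      let oc := if PySem.Int.mod kv.2 2 ≠ 0 then (acc.1 + 1, [kv.1]) else (acc.1, acc.2.1)
      (oc.1, oc.2, acc.2.2 ++ List.replicate (PySem.Int.floordiv kv.2 2).toNat kv.1))
    (0, [], [])
  if acc.1 > 1 then []
  else
    let ans := (pvPalinA acc.2.2 [] ([], ([] : PySem.Set (List Char)))).1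
    let finalans := ans.map (fun s => String.ofList (s ++ acc.2.1 ++ s.reverse))
    PySem.List.sorted finalans (fun x => x)

-- ===== PORT B =====
-- backtrack(items, prefix): items[:idx] + [(ch, c-1)] + items[idx+1:] is take/drop (exact, 0 ≤ idx < len);
-- halves is the threaded accumulator.
def pvBtB (items : List (Char × Int)) (pre : List Char) (total : Int)
    (halves : List (List Char)) : List (List Char) :=
  if (pre.length : Int) = total then halves ++ [pre]
  else
    (List.range items.length).attach.foldl
      (fun hs i =>
        if 0 < (items[i.1]'(List.mem_range.mp i.2)).2 then
          pvBtB (items.take i.1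
              ++ [((items[i.1]'(List.mem_range.mp i.2)).1,
                   (items[i.1]'(List.mem_range.mp i.2)).2 - 1)]
              ++ items.drop (i.1 + 1))
            (pre ++ [(items[i.1]'(List.mem_range.mp i.2)).1]) total hs
        else hs)
      halves
termination_by (items.map (fun p => p.2.toNat)).sum
decreasing_by
  exact pvBtB_dec items i.1 (List.mem_range.mp i.2) (by assumption)

def PalindromicPermutations_alt (string : String) : List String :=
  let counts := string.toList.foldl (fun d c => d.insert c (d.getD c 0 + 1)) PySem.Dict.empty
  let odd := (counts.items.filter (fun kv => PySem.Int.mod kv.2 2 != 0)).map (fun kv => kv.1)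
  if odd.length > 1 then []
  else
    let mid : List Char := match odd with | [] => [] | c :: _ => [c]
    let items := (counts.items.filter (fun kv => 0 < PySem.Int.floordiv kv.2 2)).map
      (fun kv => (kv.1, PySem.Int.floordiv kv.2 2))
    let total : Int := (items.map (fun p => p.2)).sum
    let halves := pvBtB items [] total []
    let res := halves.map (fun h => String.ofList (h ++ mid ++ h.reverse))
    PySem.List.sorted res (fun x => x)

-- ===== PRECONDITION & SPEC =====
def Spec_PalindromicPermutations (string : String) (out : List String) : Prop := out = PalindromicPermutations_alt string
instance (string : String) (out : List String) : Decidable (Spec_PalindromicPermutations string out) := by unfold Spec_PalindromicPermutations; infer_instance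

-- ===== CLAIM (what is proved, stated in full; the proofs are below) =====
def Claim_equal_PalindromicPermutations : Prop := ∀ (string : String), Dom_PalindromicPermutations string → Spec_PalindromicPermutations string (PalindromicPermutations string)


-- ===== LEMMAS AND PROOFS =====

-- helper notions used only by the proofs
def pvExpand (items : List (Char × Int)) : List Char :=
  items.flatMap (fun p => List.replicate p.2.toNat p.1)

def pvDec (items : List (Char × Int)) (i : Nat) (h : i < items.length) : List (Char × Int) :=
  items.take i ++ [((items[i]).1, (items[i]).2 - 1)] ++ items.drop (i + 1)

-- A's counting loop computes Counter(string)
theorem pvDictA_eq (cs : List Char) :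
    cs.foldl (fun d c => if d.contains c then d.modify c 0 (· + 1) else d.insert c 1)
      PySem.Dict.empty = PySem.Dict.counter cs := by
  have hstep : (fun (d : PySem.Dict Char Int) c =>
      if d.contains c then d.modify c 0 (· + 1) else d.insert c 1)
      = (fun (d : PySem.Dict Char Int) c => d.modify c 0 (· + 1)) := by
    funext d c
    by_cases h : d.contains c = true
    · simp [h]
    · have hfind : List.find? (fun p => p.1 == c) d.items = none := by
        rw [List.find?_eq_none]
        intro p hp hb
        exact h (by simp only [PySem.Dict.contains, List.any_eq_true]; exact ⟨p, hp, hb⟩)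
      simp [h, PySem.Dict.modify, PySem.Dict.getD, PySem.Dict.get?, hfind]
  rw [hstep]
  rfl

-- A's items loop: odd count, last odd key, concatenation of half-multiplicities
theorem pvItemsFold (l : List (Char × Int)) (a : Int × List Char × List Char) :
    l.foldl
      (fun (acc : Int × List Char × List Char) kv =>
        let oc := if PySem.Int.mod kv.2 2 ≠ 0 then (acc.1 + 1, [kv.1]) else (acc.1, acc.2.1)
        (oc.1, oc.2, acc.2.2 ++ List.replicate (PySem.Int.floordiv kv.2 2).toNat kv.1)) a
    = (a.1 + ((l.filter (fun kv => PySem.Int.mod kv.2 2 != 0)).length : Int),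
       (l.filter (fun kv => PySem.Int.mod kv.2 2 != 0)).foldl (fun _ kv => [kv.1]) a.2.1,
       a.2.2 ++ l.flatMap (fun kv => List.replicate (PySem.Int.floordiv kv.2 2).toNat kv.1)) := by
  induction l generalizing a with
  | nil => simp
  | cons kv l ih =>
    by_cases hm : PySem.Int.mod kv.2 2 = 0 <;>
      simp only [List.foldl_cons, List.filter_cons, hm, bne_iff_ne, ne_eq,
        not_true_eq_false, not_false_eq_true, if_true, if_false,
        List.flatMap_cons, ih, List.length_cons,
        List.foldl_cons] <;>
      refine Prod.ext ?_ (Prod.ext ?_ ?_) <;>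
      · simp [List.append_assoc]; try ring

-- A's half string is the expansion of B's (char, halfcount) items
theorem pvTemp_eq (l : List (Char × Int)) :
    l.flatMap (fun kv => List.replicate (PySem.Int.floordiv kv.2 2).toNat kv.1)
    = pvExpand ((l.filter (fun kv => decide (0 < PySem.Int.floordiv kv.2 2))).map
        (fun kv => (kv.1, PySem.Int.floordiv kv.2 2))) := by
  induction l with
  | nil => simp [pvExpand]
  | cons kv l ih =>
    simp only [List.flatMap_cons, List.filter_cons]
    by_cases h : 0 < PySem.Int.floordiv kv.2 2
    · rw [if_pos (by simpa using h)]
      simp only [List.map_cons, pvExpand, List.flatMap_cons] at *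
      rw [ih]
    · rw [if_neg (by simpa using h)]
      have h0 : (PySem.Int.floordiv kv.2 2).toNat = 0 := by omega
      rw [h0]
      simp only [List.replicate_zero, List.nil_append]
      exact ih

-- permutations of temp = choices of a first index
theorem pvPermIdxA (temp : List Char) (hne : temp ≠ []) (q : List Char) :
    q.Perm temp ↔ ∃ i, ∃ h : i < temp.length, ∃ p,
      p.Perm (temp.take i ++ temp.drop (i + 1)) ∧ q = temp[i] :: p := by
  constructor
  · intro hq
    have hqne : q ≠ [] := by
      intro h; subst h; exact hne hq.nil_eq.symm
    obtain ⟨c, p, rfl⟩ := List.exists_cons_of_ne_nil hqne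
    rw [List.cons_perm_iff_perm_erase] at hq
    obtain ⟨hcmem, hp⟩ := hq
    obtain ⟨j, hj⟩ : ∃ j, List.idxOf? c temp = some j := by
      cases hj : List.idxOf? c temp with
      | none => exact absurd hcmem (by simpa [List.idxOf?_eq_none_iff] using hj)
      | some j => exact ⟨j, rfl⟩
    obtain ⟨hjl, hje, -⟩ := List.idxOf?_eq_some_iff.mp hj
    refine ⟨j, hjl, p, ?_, by rw [hje]⟩
    rw [← List.eraseIdx_eq_take_drop_succ]
    have her : temp.erase c = temp.eraseIdx j := by
      rw [List.erase_eq_eraseIdx, hj]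
    rw [← her]; exact hp
  · rintro ⟨i, h, p, hp, rfl⟩
    have hmid : temp.Perm (temp[i] :: (temp.take i ++ temp.drop (i + 1))) := by
      conv_lhs => rw [← List.take_append_drop i temp, ← List.getElem_cons_drop h]
      exact List.perm_middle
    exact (hp.cons temp[i]).trans hmid.symm

-- the two branches of A's recursion as one-step equations
theorem pvPalinA_nil_eq (s : List Char) (st : List (List Char) × PySem.Set (List Char)) :
    pvPalinA [] s st
      = ((if PySem.Set.contains st.2 s then st.1 else st.1 ++ [s]), PySem.Set.add st.2 s) := by
  rw [pvPalinA]
  simp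

-- base case of A's recursion (temp = "")
theorem pvPalinA_base (s : List Char) (ans : List (List Char)) (st : PySem.Set (List Char))
    (hinv : ∀ y, y ∈ st ↔ y ∈ ans) :
    (∀ y, y ∈ (pvPalinA [] s (ans, st)).2 ↔ y ∈ (pvPalinA [] s (ans, st)).1) ∧
    (ans.Nodup → (pvPalinA [] s (ans, st)).1.Nodup) ∧
    (∀ x, x ∈ (pvPalinA [] s (ans, st)).1 ↔ x ∈ ans ∨ ∃ p, p.Perm ([] : List Char) ∧ x = s ++ p) := by
  rw [pvPalinA_nil_eq s (ans, st)]
  by_cases hs : PySem.Set.contains st s = true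
  · have hsm : s ∈ ans := (hinv s).mp (List.contains_iff_mem.mp hs)
    refine ⟨fun y => ?_, fun h => by rw [if_pos hs]; exact h, fun x => ?_⟩
    · simp only [if_pos hs, PySem.Set.mem_add]
      constructor
      · rintro (hy | rfl)
        · exact (hinv y).mp hy
        · exact hsm
      · exact fun hy => Or.inl ((hinv y).mpr hy)
    · simp only [if_pos hs, List.perm_nil]
      constructor
      · exact Or.inl
      · rintro (h | ⟨p, rfl, rfl⟩)
        · exact h
        · simpa using hsm
  · have hsm : s ∉ ans := fun h => hs (List.contains_iff_mem.mpr ((hinv s).mpr h))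
    refine ⟨fun y => ?_, fun hnd => ?_, fun x => ?_⟩
    · simp only [if_neg hs, PySem.Set.mem_add, List.mem_append, List.mem_singleton]
      rw [hinv y]
    · simp only [if_neg hs]
      simp [List.nodup_append, hnd]
      exact fun a ha he => hsm (he ▸ ha)
    · simp only [if_neg hs, List.perm_nil]
      simp

theorem pvPalinA_cons_eq (temp s : List Char) (hne : temp ≠ [])
    (st : List (List Char) × PySem.Set (List Char)) :
    pvPalinA temp s st
      = (List.range temp.length).attach.foldl
          (fun acc i =>
            pvPalinA (temp.take i.1 ++ temp.drop (i.1 + 1))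
              (s ++ [temp[i.1]'(List.mem_range.mp i.2)]) acc) st := by
  rw [pvPalinA, if_neg hne]

-- master lemma for A's recursion: set tracks ans, ans collects string ++ (each permutation), nodup kept
theorem pvPalinA_master : ∀ (N : Nat) (temp : List Char), temp.length ≤ N →
    ∀ (s : List Char) (ans : List (List Char)) (st : PySem.Set (List Char)),
    (∀ y, y ∈ st ↔ y ∈ ans) →
    (∀ y, y ∈ (pvPalinA temp s (ans, st)).2 ↔ y ∈ (pvPalinA temp s (ans, st)).1) ∧
    (ans.Nodup → (pvPalinA temp s (ans, st)).1.Nodup) ∧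
    (∀ x, x ∈ (pvPalinA temp s (ans, st)).1 ↔ x ∈ ans ∨ ∃ p, p.Perm temp ∧ x = s ++ p) := by
  intro N
  induction N with
  | zero =>
    intro temp hlen s ans st hinv
    have htemp : temp = [] := by cases temp <;> simp_all
    subst htemp
    exact pvPalinA_base s ans st hinv
  | succ N ih =>
    intro temp hlen s ans st hinv
    by_cases htemp : temp = []
    · subst htemp
      exact pvPalinA_base s ans st hinv
    · have hpos : 0 < temp.length := List.length_pos_of_ne_nil htemp
      -- the fold over the indices, with the union over the processed indices
      have hfold : ∀ (l : List {i // i ∈ List.range temp.length})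
          (ans : List (List Char)) (st : PySem.Set (List Char)),
          (∀ y, y ∈ st ↔ y ∈ ans) →
          (∀ y, y ∈ (l.foldl (fun acc i =>
              pvPalinA (temp.take i.1 ++ temp.drop (i.1 + 1))
                (s ++ [temp[i.1]'(List.mem_range.mp i.2)]) acc) (ans, st)).2 ↔
            y ∈ (l.foldl (fun acc i =>
              pvPalinA (temp.take i.1 ++ temp.drop (i.1 + 1))
                (s ++ [temp[i.1]'(List.mem_range.mp i.2)]) acc) (ans, st)).1) ∧
          (ans.Nodup → (l.foldl (fun acc i =>
              pvPalinA (temp.take i.1 ++ temp.drop (i.1 + 1))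
                (s ++ [temp[i.1]'(List.mem_range.mp i.2)]) acc) (ans, st)).1.Nodup) ∧
          (∀ x, x ∈ (l.foldl (fun acc i =>
              pvPalinA (temp.take i.1 ++ temp.drop (i.1 + 1))
                (s ++ [temp[i.1]'(List.mem_range.mp i.2)]) acc) (ans, st)).1 ↔
            x ∈ ans ∨ ∃ a ∈ l, ∃ p,
              p.Perm (temp.take a.1 ++ temp.drop (a.1 + 1)) ∧
              x = s ++ temp[a.1]'(List.mem_range.mp a.2) :: p) := by
        intro l
        induction l with
        | nil => intro ans st hinv; simp [hinv]
        | cons a l ihl =>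
          intro ans st hinv
          have hlt : temp.length - 1 ≤ N := by omega
          have hlen' : (temp.take a.1 ++ temp.drop (a.1 + 1)).length ≤ N := by
            have := List.mem_range.mp a.2
            simp only [List.length_append, List.length_take, List.length_drop]
            omega
          obtain ⟨ha1, ha2, ha3⟩ := ih _ hlen'
            (s ++ [temp[a.1]'(List.mem_range.mp a.2)]) ans st hinv
          simp only [List.foldl_cons]
          rw [← Prod.mk.eta
            (p := pvPalinA (temp.take a.1 ++ temp.drop (a.1 + 1))
              (s ++ [temp[a.1]'(List.mem_range.mp a.2)]) (ans, st))]
          obtain ⟨hb1, hb2, hb3⟩ := ihl _ _ ha1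
          refine ⟨hb1, fun hnd => hb2 (ha2 hnd), ?_⟩
          intro x
          rw [hb3 x, ha3 x]
          constructor
          · rintro ((hx | ⟨p, hp, rfl⟩) | ⟨b, hb, p, hp, rfl⟩)
            · exact Or.inl hx
            · exact Or.inr ⟨a, by simp, p, hp, by simp⟩
            · exact Or.inr ⟨b, by simp [hb], p, hp, rfl⟩
          · rintro (hx | ⟨b, hb, p, hp, rfl⟩)
            · exact Or.inl (Or.inl hx)
            · rcases List.mem_cons.mp hb with rfl | hbl
              · exact Or.inl (Or.inr ⟨p, hp, by simp⟩)
              · exact Or.inr ⟨b, hbl, p, hp, rfl⟩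
      rw [pvPalinA_cons_eq temp s htemp]
      obtain ⟨h1, h2, h3⟩ := hfold (List.range temp.length).attach ans st hinv
      refine ⟨h1, h2, ?_⟩
      intro x
      rw [h3 x]
      have hiff := pvPermIdxA temp htemp
      constructor
      · rintro (hx | ⟨a, _, p, hp, rfl⟩)
        · exact Or.inl hx
        · exact Or.inr ⟨temp[a.1]'(List.mem_range.mp a.2) :: p,
            (hiff _).mpr ⟨a.1, List.mem_range.mp a.2, p, hp, rfl⟩, rfl⟩
      · rintro (hx | ⟨q, hq, rfl⟩)
        · exact Or.inl hx
        · obtain ⟨i, hilt, p, hp, rfl⟩ := (hiff q).mp hq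
          exact Or.inr ⟨⟨i, List.mem_range.mpr hilt⟩, List.mem_attach _ _, p, hp, rfl⟩

-- expansion facts
theorem pvExpand_split (items : List (Char × Int)) (i : Nat) (h : i < items.length) :
    pvExpand items = pvExpand (items.take i)
      ++ List.replicate (items[i]).2.toNat (items[i]).1 ++ pvExpand (items.drop (i + 1)) := by
  simp only [pvExpand]
  conv_lhs => rw [show items = items.take i ++ items[i] :: items.drop (i + 1) by
    rw [List.getElem_cons_drop, List.take_append_drop]]
  simp only [List.flatMap_append, List.flatMap_cons, List.append_assoc]

theorem pvExpand_dec (items : List (Char × Int)) (i : Nat) (h : i < items.length) :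
    pvExpand (pvDec items i h) = pvExpand (items.take i)
      ++ List.replicate ((items[i]).2 - 1).toNat (items[i]).1 ++ pvExpand (items.drop (i + 1)) := by
  simp [pvDec, pvExpand, List.flatMap_append, List.append_assoc]

theorem pvDec_map_fst (items : List (Char × Int)) (i : Nat) (h : i < items.length) :
    (pvDec items i h).map Prod.fst = items.map Prod.fst := by
  conv_rhs => rw [show items = items.take i ++ items[i] :: items.drop (i + 1) by
    rw [List.getElem_cons_drop, List.take_append_drop]]
  simp only [pvDec, List.map_append, List.map_cons, List.singleton_append,
    List.append_assoc]

theorem pvDec_length_expand (items : List (Char × Int)) (i : Nat) (h : i < items.length)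
    (hc : 0 < (items[i]).2) :
    (pvExpand items).length = (pvExpand (pvDec items i h)).length + 1 := by
  rw [pvExpand_split items i h, pvExpand_dec items i h]
  simp only [List.length_append, List.length_replicate]
  omega

-- permutations of the expansion = choices of a first item with positive count
theorem pvPermIdxB (items : List (Char × Int)) (hk : (items.map Prod.fst).Nodup)
    (hc : ∀ p ∈ items, 0 ≤ p.2) (hne : pvExpand items ≠ []) (q : List Char) :
    q.Perm (pvExpand items) ↔ ∃ i, ∃ h : i < items.length, 0 < (items[i]).2 ∧ ∃ p,
      p.Perm (pvExpand (pvDec items i h)) ∧ q = (items[i]).1 :: p := by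
  constructor
  · intro hq
    have hqne : q ≠ [] := by
      intro h; subst h; exact hne hq.nil_eq.symm
    obtain ⟨c, p, rfl⟩ := List.exists_cons_of_ne_nil hqne
    rw [List.cons_perm_iff_perm_erase] at hq
    obtain ⟨hcmem, hp⟩ := hq
    obtain ⟨kv, hkv, hcrep⟩ := List.mem_flatMap.mp hcmem
    have hceq : c = kv.1 := List.eq_of_mem_replicate hcrep
    have hpos : 0 < kv.2 := by
      have h1 := (List.mem_replicate.mp hcrep).1
      have h2 := hc kv hkv
      omega
    obtain ⟨i, hilt, hieq⟩ := List.getElem_of_mem hkv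
    have hposi : 0 < (items[i]).2 := by rw [hieq]; exact hpos
    refine ⟨i, hilt, hposi, p, ?_, by rw [hieq, ← hceq]⟩
    have hnotin : c ∉ pvExpand (items.take i) := by
      intro hcin
      obtain ⟨kv', hkv', hcrep'⟩ := List.mem_flatMap.mp hcin
      obtain ⟨j, hjlt, hjeq⟩ := List.getElem_of_mem hkv'
      have hjlt' : j < i := by
        have := hjlt
        simp only [List.length_take] at this
        omega
      have hjlen : j < (items.map Prod.fst).length := by
        simp only [List.length_map]; omega
      have hilen : i < (items.map Prod.fst).length := by
        simp only [List.length_map]; exact hilt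
      have h1 : (items.map Prod.fst)[j]'hjlen = c := by
        rw [List.getElem_map]
        have hj2 : items[j]'(by omega) = kv' := by
          simpa using hjeq
        rw [hj2, ← List.eq_of_mem_replicate hcrep']
      have h2 : (items.map Prod.fst)[i]'hilen = c := by
        rw [List.getElem_map, hieq, ← hceq]
      have := (List.Nodup.getElem_inj_iff hk).mp (h1.trans h2.symm)
      omega
    have hrep : List.replicate ((items[i]).2).toNat ((items[i]).1)
        = c :: List.replicate (((items[i]).2 - 1)).toNat ((items[i]).1) := by
      rw [show ((items[i]).2).toNat = (((items[i]).2 - 1)).toNat + 1 by omega,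
        List.replicate_succ, hieq, ← hceq]
    have herase : (pvExpand items).erase c = pvExpand (pvDec items i hilt) := by
      rw [pvExpand_split items i hilt, List.append_assoc,
        List.erase_append_right _ hnotin, hrep, List.cons_append,
        List.erase_cons_head, pvExpand_dec items i hilt, List.append_assoc]
    rw [← herase]; exact hp
  · rintro ⟨i, h, hpos, p, hp, rfl⟩
    have hperm : (pvExpand items).Perm ((items[i]).1 :: pvExpand (pvDec items i h)) := by
      rw [pvExpand_split items i h, pvExpand_dec items i h,
        show ((items[i]).2).toNat = (((items[i]).2 - 1)).toNat + 1 by omega,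
        List.replicate_succ]
      simp only [List.append_assoc, List.cons_append]
      exact List.perm_middle
    exact (hp.cons _).trans hperm.symm

-- master lemma for B's backtracking: appends exactly the distinct permutations, no duplicates
theorem pvBtB_master : ∀ (N : Nat) (items : List (Char × Int)), (pvExpand items).length ≤ N →
    ∀ (pre : List Char) (total : Int) (halves : List (List Char)),
    (items.map Prod.fst).Nodup → (∀ p ∈ items, 0 ≤ p.2) →
    total = (pre.length : Int) + ((pvExpand items).length : Int) →
    ∃ L, pvBtB items pre total halves = halves ++ L ∧ L.Nodup ∧
      (∀ x, x ∈ L ↔ ∃ p, p.Perm (pvExpand items) ∧ x = pre ++ p) := by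
  intro N
  induction N with
  | zero =>
    intro items hlen pre total halves _ _ ht
    have hexp : pvExpand items = [] := List.eq_nil_of_length_eq_zero (by omega)
    rw [hexp] at ht
    have htot : (pre.length : Int) = total := by rw [ht]; simp
    rw [pvBtB, if_pos htot]
    exact ⟨[pre], rfl, List.nodup_singleton _, fun x => by simp [hexp, List.perm_nil]⟩
  | succ N ih =>
    intro items hlen pre total halves hk hc ht
    by_cases hz : (pvExpand items).length = 0
    · have hexp : pvExpand items = [] := List.eq_nil_of_length_eq_zero hz
      rw [hexp] at ht
      have htot : (pre.length : Int) = total := by rw [ht]; simp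
      rw [pvBtB, if_pos htot]
      exact ⟨[pre], rfl, List.nodup_singleton _, fun x => by simp [hexp, List.perm_nil]⟩
    · have hne : pvExpand items ≠ [] := fun h => hz (by rw [h]; rfl)
      have htot : (pre.length : Int) ≠ total := by rw [ht]; intro h; omega
      rw [pvBtB, if_neg htot]
      have hfold : ∀ (l : List {i // i ∈ List.range items.length})
          (halves : List (List Char)), (l.map Subtype.val).Nodup →
          ∃ L, (l.foldl (fun hs i =>
              if 0 < (items[i.1]'(List.mem_range.mp i.2)).2 then
                pvBtB (items.take i.1
                    ++ [((items[i.1]'(List.mem_range.mp i.2)).1,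
                         (items[i.1]'(List.mem_range.mp i.2)).2 - 1)]
                    ++ items.drop (i.1 + 1))
                  (pre ++ [(items[i.1]'(List.mem_range.mp i.2)).1]) total hs
              else hs) halves)
            = halves ++ L ∧ L.Nodup ∧
            (∀ x, x ∈ L ↔ ∃ a ∈ l, 0 < (items[a.1]'(List.mem_range.mp a.2)).2 ∧ ∃ p,
              p.Perm (pvExpand (pvDec items a.1 (List.mem_range.mp a.2))) ∧
              x = pre ++ (items[a.1]'(List.mem_range.mp a.2)).1 :: p) := by
        intro l
        induction l with
        | nil => exact fun halves _ => ⟨[], by simp, by simp, by simp⟩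
        | cons a l ihl =>
          intro halves hnd
          have ha2 := List.mem_range.mp a.2
          simp only [List.foldl_cons]
          have hnd' : (l.map Subtype.val).Nodup := (List.nodup_cons.mp hnd).2
          have hanotin : a.1 ∉ l.map Subtype.val := (List.nodup_cons.mp hnd).1
          by_cases hpa : 0 < (items[a.1]'ha2).2
          · rw [if_pos hpa]
            have hdec : items.take a.1
                ++ [((items[a.1]'ha2).1, (items[a.1]'ha2).2 - 1)]
                ++ items.drop (a.1 + 1) = pvDec items a.1 ha2 := rfl
            rw [hdec]
            have hlen' : (pvExpand (pvDec items a.1 ha2)).length ≤ N := by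
              have := pvDec_length_expand items a.1 ha2 hpa
              omega
            have hk' : ((pvDec items a.1 ha2).map Prod.fst).Nodup := by
              rw [pvDec_map_fst]; exact hk
            have hc' : ∀ p ∈ pvDec items a.1 ha2, 0 ≤ p.2 := by
              intro p hp
              rcases List.mem_append.mp hp with hp1 | hp2
              · rcases List.mem_append.mp hp1 with hp3 | hp4
                · exact hc p (List.take_subset _ _ hp3)
                · rcases List.mem_singleton.mp hp4 with rfl
                  simp only []
                  omega
              · exact hc p (List.drop_subset _ _ hp2)
            have ht' : total = ((pre ++ [(items[a.1]'ha2).1]).length : Int)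
                + ((pvExpand (pvDec items a.1 ha2)).length : Int) := by
              have := pvDec_length_expand items a.1 ha2 hpa
              simp only [List.length_append, List.length_cons, List.length_nil]
              push_cast
              omega
            obtain ⟨La, hLa, hLand, hLam⟩ :=
              ih (pvDec items a.1 ha2) hlen' (pre ++ [(items[a.1]'ha2).1]) total halves hk' hc' ht'
            rw [hLa]
            obtain ⟨L', hL', hLnd', hLm'⟩ := ihl (halves ++ La) hnd'
            rw [hL', List.append_assoc]
            have hdisj : ∀ x ∈ La, ∀ y ∈ L', x ≠ y := by
              intro x hx y hy hxy
              obtain ⟨p, _, rfl⟩ := (hLam x).mp hx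
              obtain ⟨b, hb, _, p', _, hy'⟩ := (hLm' y).mp hy
              rw [hy'] at hxy
              rw [List.append_assoc] at hxy
              have := List.append_cancel_left hxy
              simp only [List.singleton_append, List.cons.injEq] at this
              have hceq : (items[a.1]'ha2).1 = (items[b.1]'(List.mem_range.mp b.2)).1 := this.1
              have hb2 := List.mem_range.mp b.2
              have h1 : (items.map Prod.fst)[a.1]'(by simpa using ha2)
                  = (items.map Prod.fst)[b.1]'(by simpa using hb2) := by
                rw [List.getElem_map, List.getElem_map]; exact hceq
              have hab := (List.Nodup.getElem_inj_iff hk).mp h1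
              exact hanotin (hab ▸ List.mem_map_of_mem hb)
            refine ⟨La ++ L', rfl, ?_, ?_⟩
            · rw [List.nodup_append]
              exact ⟨hLand, hLnd', hdisj⟩
            · intro x
              rw [List.mem_append, hLam x, hLm' x]
              constructor
              · rintro (⟨p, hp, rfl⟩ | ⟨b, hb, hbp, p, hp, rfl⟩)
                · exact ⟨a, by simp, hpa, p, hp, by simp⟩
                · exact ⟨b, by simp [hb], hbp, p, hp, rfl⟩
              · rintro ⟨b, hb, hbp, p, hp, rfl⟩
                rcases List.mem_cons.mp hb with rfl | hbl
                · exact Or.inl ⟨p, hp, by simp⟩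
                · exact Or.inr ⟨b, hbl, hbp, p, hp, rfl⟩
          · rw [if_neg hpa]
            obtain ⟨L', hL', hLnd', hLm'⟩ := ihl halves hnd'
            refine ⟨L', hL', hLnd', fun x => ?_⟩
            rw [hLm' x]
            constructor
            · rintro ⟨b, hb, hbp, p, hp, rfl⟩
              exact ⟨b, by simp [hb], hbp, p, hp, rfl⟩
            · rintro ⟨b, hb, hbp, p, hp, rfl⟩
              rcases List.mem_cons.mp hb with rfl | hbl
              · exact absurd hbp hpa
              · exact ⟨b, hbl, hbp, p, hp, rfl⟩
      obtain ⟨L, hL, hLnd, hLm⟩ := hfold (List.range items.length).attach halves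
        (by rw [List.attach_map_subtype_val]; exact List.nodup_range)
      refine ⟨L, hL, hLnd, fun x => ?_⟩
      rw [hLm x]
      have hiff := pvPermIdxB items hk hc hne
      constructor
      · rintro ⟨a, _, hbp, p, hp, rfl⟩
        exact ⟨(items[a.1]'(List.mem_range.mp a.2)).1 :: p,
          (hiff _).mpr ⟨a.1, List.mem_range.mp a.2, hbp, p, hp, rfl⟩, rfl⟩
      · rintro ⟨q, hq, rfl⟩
        obtain ⟨i, hilt, hbp, p, hp, rfl⟩ := (hiff q).mp hq
        exact ⟨⟨i, List.mem_range.mpr hilt⟩, List.mem_attach _ _, hbp, p, hp, rfl⟩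

-- total count = length of the expansion
theorem pvTotal_eq (items : List (Char × Int)) (hc : ∀ p ∈ items, 0 < p.2) :
    (items.map (fun p => p.2)).sum = ((pvExpand items).length : Int) := by
  induction items with
  | nil => simp [pvExpand]
  | cons p l ih =>
    have hp : 0 < p.2 := hc p (by simp)
    have ih' := ih (fun q hq => hc q (by simp [hq]))
    simp only [List.map_cons, List.sum_cons, pvExpand, List.flatMap_cons,
      List.length_append, List.length_replicate] at *
    push_cast
    omega


-- ===== VERDICT (by name: the statement is the Claim_ definition above) =====
theorem PalindromicPermutations_spec : Claim_equal_PalindromicPermutations := by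
  intro string _
  unfold Spec_PalindromicPermutations
  show PalindromicPermutations string = PalindromicPermutations_alt string
  simp only [PalindromicPermutations, PalindromicPermutations_alt,
    pvDictA_eq, PySem.Dict.foldl_insert_getD_add_one_eq_counter,
    PySem.Dict.items_counter, pvItemsFold]
  set its := List.map (fun k => (k, (List.count k string.toList : Int)))
    (PySem.Set.ofList string.toList) with hits
  set odds := List.filter (fun kv => PySem.Int.mod kv.2 2 != 0) its with hodds
  by_cases hbig : 1 < odds.length
  · rw [if_pos (by omega), if_pos (by simpa using hbig)]
  · rw [if_neg (by omega), if_neg (by simpa using hbig)]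
    simp only [List.nil_append]
    set itemsB := List.map (fun kv => (kv.1, PySem.Int.floordiv kv.2 2))
      (List.filter (fun kv => decide (0 < PySem.Int.floordiv kv.2 2)) its) with hitemsB
    rw [pvTemp_eq its, ← hitemsB]
    -- facts about B's items
    have hposB : ∀ p ∈ itemsB, 0 < p.2 := by
      intro p hp
      rw [hitemsB] at hp
      obtain ⟨kv, hkv, rfl⟩ := List.mem_map.mp hp
      have := (List.mem_filter.mp hkv).2
      simpa using this
    have hkB : (itemsB.map Prod.fst).Nodup := by
      have hfst : itemsB.map Prod.fst
          = (List.filter (fun kv => decide (0 < PySem.Int.floordiv kv.2 2)) its).map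
              (fun kv => kv.1) := by
        rw [hitemsB, List.map_map]; rfl
      have hsub : ((List.filter (fun kv => decide (0 < PySem.Int.floordiv kv.2 2)) its).map
            (fun kv => kv.1)).Sublist (its.map (fun kv => kv.1)) :=
        List.filter_sublist.map _
      have hits_fst : its.map (fun kv => kv.1) = PySem.Set.ofList string.toList := by
        rw [hits, List.map_map]
        simp [Function.comp_def]
      rw [hfst]
      exact hsub.nodup (by rw [hits_fst]; exact PySem.Set.nodup_ofList _)
    have htB : (List.map (fun p => p.2) itemsB).sum
        = ((([] : List Char).length : Int)) + ((pvExpand itemsB).length : Int) := by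
      rw [pvTotal_eq itemsB hposB]; simp
    obtain ⟨L, hL, hLnd, hLm⟩ := pvBtB_master (pvExpand itemsB).length itemsB le_rfl
      [] _ [] hkB (fun p hp => le_of_lt (hposB p hp)) htB
    rw [hL, List.nil_append]
    obtain ⟨_, hnodA, hmemA⟩ := pvPalinA_master (pvExpand itemsB).length (pvExpand itemsB)
      le_rfl [] [] [] (by simp)
    have hperm : (pvPalinA (pvExpand itemsB) [] ([], [])).1.Perm L := by
      rw [List.perm_ext_iff_of_nodup (hnodA List.nodup_nil) hLnd]
      intro x
      rw [hmemA x, hLm x]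
      simp
    -- the middles agree (at most one odd-count character)
    rcases hodd : odds with _ | ⟨kv, rest⟩
    · simp only [List.foldl_nil, List.map_nil]
      exact PySem.List.sorted_eq_sorted_of_perm _ _ _ (fun a b h => h) (hperm.map _)
    · rcases rest with _ | ⟨kv2, rest2⟩
      · simp only [List.foldl_cons, List.foldl_nil, List.map_cons, List.map_nil]
        exact PySem.List.sorted_eq_sorted_of_perm _ _ _ (fun a b h => h) (hperm.map _)
      · exfalso
        rw [hodd] at hbig
        simp at hbig
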